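-- pv_equiv track=rewrite | github.com/Doubling-Open-Source/git_calculator | src/calculators/multi_repo_calculator.py | aggregate_throughput_metrics
-- ===== SOURCE A (Python) =====
-- from typing import Dict, List, Tuple, Optional, Any
-- from collections import defaultdict
--
-- def aggregate_throughput_metrics(metrics: Dict[str, Dict[str, Any]]) -> List[Tuple[str, int]]:
--     """
--     Aggregate throughput metrics across repositories.
--
--     Args:
--         metrics: Dict of repository metrics
--
--     Returns:
--         List of tuples (month, total_commits)
--     """
--     monthly_commits = defaultdict(int)
--
--     for repo_name, repo_metrics in metrics.items():
--         throughput_data = repo_metrics.get('throughput_data', [])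
--         for month, authors_set, commit_count in throughput_data:
--             monthly_commits[month] += commit_count
--
--     aggregated = []
--     for month in sorted(monthly_commits.keys()):
--         total_commits = monthly_commits[month]
--         aggregated.append((month, total_commits))
--
--     return aggregated
-- ===== SOURCE B (Python) =====
-- def _group_sorted(pairs):
--     """Sum the leading run of equal months, then recurse on the remainder."""
--     if not pairs:
--         return []
--     m, c = pairs[0]
--     i = 1
--     while i < len(pairs) and pairs[i][0] == m:
--         c += pairs[i][1]
--         i += 1
--     return [(m, c)] + _group_sorted(pairs[i:])
--
--
-- def aggregate_throughput_metrics(metrics):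
--     """B: flatten to (month, count) pairs, sort them by month, then group
--     consecutive runs of equal months, summing counts per run."""
--     pairs = sorted(
--         ((month, count)
--          for repo_metrics in metrics.values()
--          for month, _authors, count in repo_metrics.get('throughput_data', [])),
--         key=lambda p: p[0])
--     return _group_sorted(pairs)
-- ===== Notes on version B (the rewrite author's own statement) =====
-- stated objective: alternative
-- what changed: Replaces the defaultdict tally plus sorted-keys lookup with a sort-then-group decomposition: all (month, count) pairs are flattened into one list, stably sorted by month, and a recursive run accumulator sums each consecutive run of equal months.
import Mathlib
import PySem

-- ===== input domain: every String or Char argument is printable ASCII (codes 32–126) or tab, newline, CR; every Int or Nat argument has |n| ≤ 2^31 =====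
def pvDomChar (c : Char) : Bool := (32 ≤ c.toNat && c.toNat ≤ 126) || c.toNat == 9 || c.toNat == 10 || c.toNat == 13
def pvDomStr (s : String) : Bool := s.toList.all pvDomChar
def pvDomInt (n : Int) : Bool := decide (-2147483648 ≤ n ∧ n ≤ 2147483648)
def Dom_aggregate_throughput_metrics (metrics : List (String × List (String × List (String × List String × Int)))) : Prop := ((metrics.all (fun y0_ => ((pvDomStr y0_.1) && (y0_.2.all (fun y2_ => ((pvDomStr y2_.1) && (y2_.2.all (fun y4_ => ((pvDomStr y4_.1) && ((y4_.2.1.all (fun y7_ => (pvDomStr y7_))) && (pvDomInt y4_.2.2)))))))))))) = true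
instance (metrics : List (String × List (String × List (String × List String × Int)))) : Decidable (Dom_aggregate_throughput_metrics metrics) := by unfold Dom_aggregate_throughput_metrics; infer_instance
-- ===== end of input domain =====

-- B replaces A's defaultdict accumulator + key-sort-and-lookup by sort-then-group:
-- flatten to (month, count) pairs, stable-sort by month, then sum consecutive runs
-- of equal months (alternative structure, not claimed faster); return values proved equal.


-- ===== PORT A =====
-- repo_metrics.get('throughput_data', []) : first-match lookup in the inner dict (shared access helper)
def pvThroughputData (rm : List (String × List (String × List String × Int))) : List (String × List String × Int) :=
  (PySem.Dict.mk rm).getD "throughput_data" []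

def aggregate_throughput_metrics (metrics : List (String × List (String × List (String × List String × Int)))) : List (String × Int) :=
  -- monthly_commits = defaultdict(int); nested for-loops do monthly_commits[month] += commit_count
  let monthly : PySem.Dict String Int :=
    metrics.foldl (fun d r =>
      (pvThroughputData r.2).foldl (fun d e => d.modify e.1 0 (· + e.2.2)) d)
      PySem.Dict.empty
  -- for month in sorted(monthly_commits.keys()): append (month, monthly_commits[month])
  (PySem.List.sorted (PySem.Dict.keys monthly) (fun m => m) false).map
    (fun m => (m, monthly.getD m 0))

-- ===== PORT B =====
-- _group_sorted(pairs): sum the leading run of equal months (the while loop = takeWhile /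
-- dropWhile of the run), then recurse on the remainder
def pvGroupSorted : List (String × Int) → List (String × Int)
  | [] => []
  | (m, c) :: rest =>
      (m, c + ((rest.takeWhile (fun p => p.1 == m)).map (·.2)).sum) ::
        pvGroupSorted (rest.dropWhile (fun p => p.1 == m))
  termination_by l => l.length
  decreasing_by
    simpa using Nat.lt_succ_of_le (List.length_dropWhile_le _ _)

def aggregate_throughput_metrics_alt (metrics : List (String × List (String × List (String × List String × Int)))) : List (String × Int) :=
  -- pairs = sorted(((month, count) for …), key=lambda p: p[0])
  let pairs : List (String × Int) :=
    PySem.List.sorted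
      (metrics.flatMap (fun r => (pvThroughputData r.2).map (fun e => (e.1, e.2.2))))
      (fun p => p.1) false
  pvGroupSorted pairs

-- ===== PRECONDITION & SPEC =====
def Spec_aggregate_throughput_metrics (metrics : List (String × List (String × List (String × List String × Int)))) (out : List (String × Int)) : Prop := out = aggregate_throughput_metrics_alt metrics
instance (metrics : List (String × List (String × List (String × List String × Int)))) (out : List (String × Int)) : Decidable (Spec_aggregate_throughput_metrics metrics out) := by unfold Spec_aggregate_throughput_metrics; infer_instance

-- ===== CLAIM (what is proved, stated in full; the proofs are below) =====
def Claim_equal_aggregate_throughput_metrics : Prop := ∀ (metrics : List (String × List (String × List (String × List String × Int)))), Dom_aggregate_throughput_metrics metrics → Spec_aggregate_throughput_metrics metrics (aggregate_throughput_metrics metrics)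

-- ===== LEMMAS AND PROOFS =====

-- the flat (month, count) pair list both sides aggregate
def pvPairs (metrics : List (String × List (String × List (String × List String × Int)))) : List (String × Int) :=
  metrics.flatMap (fun r => (pvThroughputData r.2).map (fun e => (e.1, e.2.2)))

-- total count of month m in a pair list
def pvSumAt (l : List (String × Int)) (m : String) : Int :=
  ((l.filter (fun p => p.1 == m)).map (·.2)).sum

-- the common canonical form: sorted distinct months, each with its total
def pvCanon (pairs : List (String × Int)) : List (String × Int) :=
  (PySem.List.sorted (PySem.List.dedup (pairs.map (·.1))) (fun m => m) false).map
    (fun m => (m, pvSumAt pairs m))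

-- ---- A-side ----

-- A's nested accumulation loop is the single fold of the same step over the flattened pairs
lemma fold_flatten (metrics : List (String × List (String × List (String × List String × Int))))
    (d : PySem.Dict String Int) :
    metrics.foldl (fun d r =>
      (pvThroughputData r.2).foldl (fun d e => d.modify e.1 0 (· + e.2.2)) d) d
      = (pvPairs metrics).foldl (fun d p => d.modify p.1 0 (· + p.2)) d := by
  induction metrics generalizing d with
  | nil => simp [pvPairs]
  | cons r rest ih =>
      simp only [List.foldl_cons, pvPairs, List.flatMap_cons, List.foldl_append, List.foldl_map]
      rw [ih]
      rfl

-- value invariant of the counting fold: the tally at m is the old tally plus the matching counts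
lemma getD_fold_count (l : List (String × Int)) (d : PySem.Dict String Int) (m : String) :
    (l.foldl (fun d p => d.modify p.1 0 (· + p.2)) d).getD m 0
      = d.getD m 0 + pvSumAt l m := by
  induction l generalizing d with
  | nil => simp [pvSumAt]
  | cons p rest ih =>
      simp only [List.foldl_cons, pvSumAt, List.filter_cons]
      rw [ih]
      by_cases h : p.1 = m
      · simp [pvSumAt, h, PySem.Dict.getD_modify_self]
        ring
      · simp [pvSumAt, PySem.Dict.getD_modify, h, Ne.symm h]

lemma A_eq_canon (metrics : List (String × List (String × List (String × List String × Int)))) :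
    aggregate_throughput_metrics metrics = pvCanon (pvPairs metrics) := by
  show (PySem.List.sorted
      (PySem.Dict.keys ((metrics.foldl (fun d r =>
        (pvThroughputData r.2).foldl (fun d e => d.modify e.1 0 (· + e.2.2)) d) PySem.Dict.empty)))
      (fun m => m) false).map
    (fun m => (m, (metrics.foldl (fun d r =>
        (pvThroughputData r.2).foldl (fun d e => d.modify e.1 0 (· + e.2.2)) d) PySem.Dict.empty).getD m 0))
      = pvCanon (pvPairs metrics)
  rw [fold_flatten]
  have hkeys :
      ((pvPairs metrics).foldl (fun d p => d.modify p.1 0 (· + p.2)) PySem.Dict.empty).keys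
        = PySem.List.dedup ((pvPairs metrics).map (·.1)) := by
    rw [show (fun (d : PySem.Dict String Int) (p : String × Int) => d.modify p.1 0 (· + p.2))
          = (fun d p => d.modify ((·.1) p) 0 (· + p.2)) from rfl]
    rw [PySem.Dict.keys_foldl_modify_key]
    simp [PySem.Set.update_nil_left]
  rw [hkeys]
  apply List.map_congr_left
  intro m _
  rw [getD_fold_count]
  simp

-- ---- B-side ----

-- once a value is already in the set, its later occurrences are no-ops for the ofList fold
lemma foldl_add_filter_ne {α : Type} [DecidableEq α] (l : List α) (s : PySem.Set α) (x : α)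
    (hx : x ∈ s) :
    l.foldl PySem.Set.add s = (l.filter (fun y => ¬ y = x)).foldl PySem.Set.add s := by
  induction l generalizing s with
  | nil => rfl
  | cons y l ih =>
      simp only [List.foldl_cons, List.filter_cons]
      by_cases h : y = x
      · subst h
        have : PySem.Set.add s y = s := by
          simp [PySem.Set.add, hx]
        simp [this, ih s hx]
      · simp only [h, decide_not]
        have hx' : x ∈ PySem.Set.add s y := by
          simp [PySem.Set.add]
          split <;> simp [hx]
        simp [List.foldl_cons, ih _ hx']

-- a head element absent from the tail commutes out of the ofList fold
lemma foldl_add_cons_out {α : Type} [DecidableEq α] (l : List α) (s : PySem.Set α) (x : α)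
    (h : ∀ y ∈ l, y ≠ x) :
    l.foldl PySem.Set.add (x :: s) = x :: l.foldl PySem.Set.add s := by
  induction l generalizing s with
  | nil => rfl
  | cons y l ih =>
      have hy : y ≠ x := h y (by simp)
      have hstep : PySem.Set.add (x :: s) y = x :: PySem.Set.add s y := by
        simp [PySem.Set.add, PySem.Set.contains, hy]
        split <;> simp
      simp only [List.foldl_cons, hstep]
      exact ih _ (fun z hz => h z (by simp [hz]))

-- first-occurrence dedup, one group at a time
lemma dedup_cons {α : Type} [DecidableEq α] (x : α) (xs : List α) :
    PySem.List.dedup (x :: xs) = x :: PySem.List.dedup (xs.filter (fun y => ¬ y = x)) := by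
  have h1 : PySem.List.dedup (x :: xs) = xs.foldl PySem.Set.add [x] := rfl
  rw [h1, foldl_add_filter_ne xs [x] x (by simp)]
  rw [foldl_add_cons_out _ [] x (by
    intro y hy
    simpa using (List.of_mem_filter hy))]
  rfl

-- the fold building a PySem set produces a sublist of its input (appended to the start state)
lemma foldl_add_sublist {α : Type} [DecidableEq α] (l : List α) (s : PySem.Set α) :
    ∃ u, l.foldl PySem.Set.add s = s ++ u ∧ u.Sublist l := by
  induction l generalizing s with
  | nil => exact ⟨[], by simp⟩
  | cons y l ih =>
      by_cases h : y ∈ s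
      · obtain ⟨u, hu, hsub⟩ := ih s
        refine ⟨u, ?_, hsub.cons _⟩
        simpa [PySem.Set.add, h] using hu
      · obtain ⟨u, hu, hsub⟩ := ih (s ++ [y])
        refine ⟨y :: u, ?_, hsub.cons₂ _⟩
        simp only [List.foldl_cons, PySem.Set.add]
        rw [if_neg (by simpa using h), hu, List.append_assoc]
        rfl

lemma dedup_sublist {α : Type} [DecidableEq α] (l : List α) :
    (PySem.List.dedup l).Sublist l := by
  obtain ⟨u, hu, hsub⟩ := foldl_add_sublist l []
  simpa [PySem.List.dedup, PySem.Set.ofList_eq_foldl, hu] using hsub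

-- grouping characterisation: on a key-sorted pair list, the run-summing recursion yields
-- exactly (distinct months in order, total at each month)
lemma group_char (l : List (String × Int)) (h : l.Pairwise (fun a b => a.1 ≤ b.1)) :
    pvGroupSorted l
      = (PySem.List.dedup (l.map (·.1))).map (fun m => (m, pvSumAt l m)) := by
  induction l using pvGroupSorted.induct with
  | case1 => simp [pvGroupSorted, pvSumAt]
  | case2 m c rest ih =>
      have hrest := List.pairwise_cons.mp h
      set t := rest.takeWhile (fun p => p.1 == m) with ht
      set d := rest.dropWhile (fun p => p.1 == m) with hd
      have hsplit : rest = t ++ d := (List.takeWhile_append_dropWhile).symm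
      have htm : ∀ p ∈ t, p.1 = m := by
        intro p hp
        simpa using List.mem_takeWhile_imp hp
      have hdm : ∀ p ∈ d, m < p.1 := by
        cases hdc : d with
        | nil => simp
        | cons q d' =>
            have hqrest : q ∈ rest := by rw [hsplit, hdc]; simp
            have hq1 : ¬ q.1 = m := by
              have := List.head?_dropWhile_not (fun p => p.1 == m) rest
              rw [← hd, hdc] at this
              simpa using this
            have hqlt : m < q.1 := lt_of_le_of_ne (hrest.1 q hqrest) (Ne.symm hq1)
            have hpd : (q :: d').Pairwise (fun a b => a.1 ≤ b.1) := by
              rw [← hdc, hd]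
              exact hrest.2.sublist (List.dropWhile_sublist _)
            intro p hp
            rcases List.mem_cons.mp hp with rfl | hp'
            · exact hqlt
            · exact lt_of_lt_of_le hqlt ((List.pairwise_cons.mp hpd).1 p hp')
      -- dedup of the key list splits off the head group
      have hkeys : PySem.List.dedup (((m, c) :: rest).map (·.1))
          = m :: PySem.List.dedup (d.map (·.1)) := by
        rw [List.map_cons, dedup_cons]
        congr 1
        congr 1
        rw [hsplit]
        simp only [List.map_append, List.filter_append]
        have h1 : (t.map (·.1)).filter (fun y => ¬ y = m) = [] := by
          rw [List.filter_eq_nil_iff]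
          intro a ha
          obtain ⟨p, hp, rfl⟩ := List.mem_map.mp ha
          simp [htm p hp]
        have h2 : (d.map (·.1)).filter (fun y => ¬ y = m) = d.map (·.1) := by
          rw [List.filter_eq_self]
          intro a ha
          obtain ⟨p, hp, rfl⟩ := List.mem_map.mp ha
          simp [(hdm p hp).ne']
        rw [h1, h2, List.nil_append]
      -- head total: c + the run's counts
      have hhead : pvSumAt ((m, c) :: rest) m = c + ((t.map (·.2)).sum) := by
        simp only [pvSumAt, List.filter_cons, hsplit, List.filter_append]
        have h1 : t.filter (fun p => p.1 == m) = t := by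
          rw [List.filter_eq_self]; intro p hp; simp [htm p hp]
        have h2 : d.filter (fun p => p.1 == m) = [] := by
          rw [List.filter_eq_nil_iff]; intro p hp; simp [(hdm p hp).ne']
        simp [h1, h2]
      -- tail totals agree with totals over d alone
      have htail : ∀ m' ∈ PySem.List.dedup (d.map (·.1)),
          pvSumAt ((m, c) :: rest) m' = pvSumAt d m' := by
        intro m' hm'
        have hm'd : m' ∈ d.map (·.1) := (PySem.List.mem_dedup _ _).mp hm'
        obtain ⟨p, hp, rfl⟩ := List.mem_map.mp hm'd
        have hne : ¬ m = p.1 := (hdm p hp).ne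
        simp only [pvSumAt, List.filter_cons, hsplit, List.filter_append]
        have h1 : t.filter (fun q => q.1 == p.1) = [] := by
          rw [List.filter_eq_nil_iff]
          intro q hq
          simp [htm q hq, hne]
        simp [hne, h1]
      have hdpw : d.Pairwise (fun a b => a.1 ≤ b.1) :=
        hrest.2.sublist (List.dropWhile_sublist _)
      calc pvGroupSorted ((m, c) :: rest)
          = (m, c + ((t.map (·.2)).sum)) :: pvGroupSorted d := by
            rw [pvGroupSorted]
        _ = (m, pvSumAt ((m, c) :: rest) m)
              :: (PySem.List.dedup (d.map (·.1))).map (fun m' => (m', pvSumAt d m')) := by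
            rw [hhead, ih hdpw]
        _ = (PySem.List.dedup (((m, c) :: rest).map (·.1))).map
              (fun m' => (m', pvSumAt ((m, c) :: rest) m')) := by
            rw [hkeys, List.map_cons]
            congr 1
            exact (List.map_congr_left (fun m' hm' => by rw [htail m' hm'])).symm

lemma B_eq_canon (metrics : List (String × List (String × List (String × List String × Int)))) :
    aggregate_throughput_metrics_alt metrics = pvCanon (pvPairs metrics) := by
  show pvGroupSorted (PySem.List.sorted (pvPairs metrics) (fun p => p.1) false)
      = pvCanon (pvPairs metrics)
  set s := PySem.List.sorted (pvPairs metrics) (fun p => p.1) false with hs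
  rw [group_char s (PySem.List.sorted_pairwise _ _)]
  -- the deduped keys of the sorted pairs ARE sorted(distinct keys)
  have hperm : (PySem.List.dedup (s.map (·.1))).Perm
      (PySem.List.dedup ((pvPairs metrics).map (·.1))) := by
    rw [List.perm_ext_iff_of_nodup (PySem.List.nodup_dedup _) (PySem.List.nodup_dedup _)]
    intro a
    simp only [PySem.List.mem_dedup, List.mem_map, hs]
    constructor <;> rintro ⟨p, hp, rfl⟩ <;>
      exact ⟨p, by simpa [PySem.List.mem_sorted] using hp, rfl⟩
  have hlt : (PySem.List.dedup (s.map (·.1))).Pairwise (· < ·) := by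
    have hle : (PySem.List.dedup (s.map (·.1))).Pairwise (· ≤ ·) :=
      (PySem.List.sorted_map_key_pairwise _ _).sublist (dedup_sublist _)
    have hne : (PySem.List.dedup (s.map (·.1))).Pairwise (· ≠ ·) :=
      PySem.List.nodup_dedup _
    exact (hle.and hne).imp (fun h => lt_of_le_of_ne h.1 h.2)
  have hkeys : PySem.List.sorted (PySem.List.dedup ((pvPairs metrics).map (·.1)))
      (fun m => m) false = PySem.List.dedup (s.map (·.1)) :=
    PySem.List.sorted_eq_of_perm_of_pairwise_lt _ _ _ hperm hlt
  rw [pvCanon, hkeys]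
  apply List.map_congr_left
  intro m _
  -- totals are order-independent: filter of a permutation, summed
  have : (s.filter (fun p => p.1 == m)).Perm ((pvPairs metrics).filter (fun p => p.1 == m)) :=
    (PySem.List.sorted_perm _ _ _).filter _
  simp [pvSumAt, (this.map (·.2)).sum_eq]

-- ===== VERDICT (by name: the statement is the Claim_ definition above) =====
theorem aggregate_throughput_metrics_spec : Claim_equal_aggregate_throughput_metrics := by
  intro metrics _
  show aggregate_throughput_metrics metrics = aggregate_throughput_metrics_alt metrics
  rw [A_eq_canon, B_eq_canon]
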